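-- pv_equiv track=rewrite | github.com/pypi-data/pypi-mirror-380 | packages/dataguild-snowflake-connector/dataguild_snowflake_connector-1.1.4.tar.gz/dataguild_snowflake_connector-1.1.4/src/dataguild/source/snowflake/utils.py | split_qualified_name
-- ===== SOURCE A (Python) =====
-- from typing import ClassVar, List, Literal, Optional, Tuple
--
-- def split_qualified_name(qualified_name: str) -> List[str]:
--     """
--     Split a qualified name into its constituent parts, handling quoted identifiers.
--
--     Examples:
--         >>> split_qualified_name("db.my_schema.my_table")
--         ['db', 'my_schema', 'my_table']
--         >>> split_qualified_name('"db"."my_schema"."my_table"')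
--         ['db', 'my_schema', 'my_table']
--         >>> split_qualified_name('TEST_DB.TEST_SCHEMA."TABLE.WITH.DOTS"')
--         ['TEST_DB', 'TEST_SCHEMA', 'TABLE.WITH.DOTS']
--         >>> split_qualified_name('TEST_DB."SCHEMA.WITH.DOTS".MY_TABLE')
--         ['TEST_DB', 'SCHEMA.WITH.DOTS', 'MY_TABLE']
--
--     Args:
--         qualified_name: Qualified name to split
--
--     Returns:
--         List of name parts without quotes
--     """
--     # Fast path - no quotes
--     if '"' not in qualified_name:
--         return qualified_name.split(".")
--
--     # First pass - split on dots that are not inside quotes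
--     in_quote = False
--     parts: List[List[str]] = [[]]
--
--     for char in qualified_name:
--         if char == '"':
--             in_quote = not in_quote
--         elif char == "." and not in_quote:
--             parts.append([])
--         else:
--             parts[-1].append(char)
--
--     # Second pass - remove outer pairs of quotes
--     result = []
--     for part in parts:
--         if len(part) > 2 and part[0] == '"' and part[-1] == '"':
--             part = part[1:-1]
--         result.append("".join(part))
--
--     return result
-- ===== SOURCE B (Python) =====
-- from typing import List
--
--
-- def split_qualified_name(qualified_name: str) -> List[str]:
--     # Split once on '"': even-indexed segments are outside quotes (split on '.'),
--     # odd-indexed segments are inside quotes (kept verbatim); quote chars vanish.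
--     result: List[str] = []
--     current = ""
--     for i, seg in enumerate(qualified_name.split('"')):
--         if i % 2 == 0:
--             pieces = seg.split(".")
--             current += pieces[0]
--             for piece in pieces[1:]:
--                 result.append(current)
--                 current = piece
--         else:
--             current += seg
--     result.append(current)
--     return result
-- ===== Notes on version B (the rewrite author's own statement) =====
-- stated objective: alternative
-- what changed: B replaces A's per-character quote-toggling state machine (plus its dead second strip-outer-quotes pass) by one split on the quote character: even-indexed segments, lying outside quotes, are split on dots, while odd-indexed segments, lying inside quotes, are appended verbatim to the current part.
import Mathlib
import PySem

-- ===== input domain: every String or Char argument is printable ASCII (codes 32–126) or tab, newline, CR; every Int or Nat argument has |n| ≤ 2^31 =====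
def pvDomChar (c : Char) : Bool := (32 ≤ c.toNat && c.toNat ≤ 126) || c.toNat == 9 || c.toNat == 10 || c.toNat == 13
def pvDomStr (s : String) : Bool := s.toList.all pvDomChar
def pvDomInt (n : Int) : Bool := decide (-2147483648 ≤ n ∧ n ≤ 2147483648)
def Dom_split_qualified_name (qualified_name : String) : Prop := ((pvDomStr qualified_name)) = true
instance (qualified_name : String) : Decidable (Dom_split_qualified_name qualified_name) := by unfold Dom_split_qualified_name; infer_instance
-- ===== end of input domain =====

-- B replaces A's per-character state machine by a single split on the quote character (even
-- segments, outside quotes, are split on dots; odd segments kept verbatim); same cost, plainer.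


-- ===== PORT A =====
-- parts[-1].append(char); parts is never empty in A, the [] branch is unreachable
def pvAppendLast : List (List Char) → Char → List (List Char)
  | [], c => [[c]]
  | [p], c => [p ++ [c]]
  | p :: ps, c => p :: pvAppendLast ps c

-- the body of A's first-pass for-loop, state = (in_quote, parts)
def pvLoopA (st : Bool × List (List Char)) (c : Char) : Bool × List (List Char) :=
  if c = '"' then (!st.1, st.2)
  else if c = '.' && !st.1 then (st.1, st.2 ++ [[]])
  else (st.1, pvAppendLast st.2 c)

-- A's second pass on one part: strip an outer pair of quotes
def pvStripQuotes (part : List Char) : List Char :=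
  if decide (part.length > 2) && (PySem.List.pyGet? part 0 == some '"')
      && (PySem.List.pyGet? part (-1) == some '"') then
    PySem.List.slice part (some 1) (some (-1))
  else part

def split_qualified_name (qualified_name : String) : List String :=
  let cs := qualified_name.toList
  if PySem.Chars.isIn ['"'] cs = false then
    (PySem.Chars.splitOn cs ['.']).map String.ofList
  else
    let parts := (cs.foldl pvLoopA (false, [[]])).2
    parts.map (fun part => String.ofList (pvStripQuotes part))

-- ===== PORT B =====
-- the body of B's for-loop over enumerate(qualified_name.split('"')), state = (result, current)
def pvStepB (st : List (List Char) × List Char) (iseg : Int × List Char) :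
    List (List Char) × List Char :=
  if PySem.Int.mod iseg.1 2 = 0 then
    match PySem.Chars.splitOn iseg.2 ['.'] with
    | [] => st   -- unreachable: str.split never returns an empty list
    | p :: rest =>
      rest.foldl (fun st2 piece => (st2.1 ++ [st2.2], piece)) (st.1, st.2 ++ p)
  else (st.1, st.2 ++ iseg.2)

def split_qualified_name_alt (qualified_name : String) : List String :=
  let segs := PySem.Chars.splitOn qualified_name.toList ['"']
  let st := (PySem.List.enumerate segs).foldl pvStepB ([], [])
  (st.1 ++ [st.2]).map String.ofList

-- ===== PRECONDITION & SPEC =====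
def Spec_split_qualified_name (qualified_name : String) (out : List String) : Prop := out = split_qualified_name_alt qualified_name
instance (qualified_name : String) (out : List String) : Decidable (Spec_split_qualified_name qualified_name out) := by unfold Spec_split_qualified_name; infer_instance

-- ===== CLAIM (what is proved, stated in full; the proofs are below) =====
def Claim_equal_split_qualified_name : Prop := ∀ (qualified_name : String), Dom_split_qualified_name qualified_name → Spec_split_qualified_name qualified_name (split_qualified_name qualified_name)

-- ===== LEMMAS AND PROOFS =====

-- prepend p to the first block (a fresh block if there is none)
def pvConsFirst (p : List Char) : List (List Char) → List (List Char)
  | [] => [p]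
  | q :: qs => (p ++ q) :: qs

-- reference single-character splitter: split l at c0, with pre prefixed to the first part
def pvSplitCh (c0 : Char) (pre : List Char) : List Char → List (List Char)
  | [] => [pre]
  | c :: t => if c = c0 then pre :: pvSplitCh c0 [] t else pvSplitCh c0 (pre ++ [c]) t

-- reference form of A's first pass, built front-to-back
def pvGo : List Char → Bool → List (List Char)
  | [], _ => [[]]
  | c :: t, inq =>
    if c = '"' then pvGo t (!inq)
    else if c = '.' ∧ inq = false then [] :: pvGo t inq
    else pvConsFirst [c] (pvGo t inq)

-- merge the last block of the first list into the first block of the second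
def pvGlue : List (List Char) → List (List Char) → List (List Char)
  | [], t => t
  | [p], t => pvConsFirst p t
  | p :: ps, t => p :: pvGlue ps t

-- (dropLast, last) of c :: ps
def pvInner : List Char → List (List Char) → List (List Char) × List Char
  | c, [] => ([], c)
  | c, p :: ps => ((c :: (pvInner p ps).1), (pvInner p ps).2)

-- B's segment recursion, in reference form
def pvProcSegs : List (List Char) → Bool → List (List Char)
  | [], _ => [[]]
  | s :: rest, inq =>
    if inq then pvConsFirst s (pvProcSegs rest (!inq))
    else pvGlue (pvSplitCh '.' [] s) (pvProcSegs rest (!inq))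

-- re-join the '"'-segments
def pvRejoin : List (List Char) → List Char
  | [] => []
  | [s] => s
  | s :: rest => s ++ '"' :: pvRejoin rest

theorem pvConsFirst_ne_nil (p : List Char) (xs : List (List Char)) : pvConsFirst p xs ≠ [] := by
  cases xs <;> simp [pvConsFirst]

theorem pvConsFirst_append (p q : List Char) (xs : List (List Char)) :
    pvConsFirst (p ++ q) xs = pvConsFirst p (pvConsFirst q xs) := by
  cases xs <;> simp [pvConsFirst]

theorem pvSplitCh_ne_nil (c0 : Char) (pre l) : pvSplitCh c0 pre l ≠ [] := by
  induction l generalizing pre with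
  | nil => simp [pvSplitCh]
  | cons c t ih => by_cases h : c = c0 <;> simp [pvSplitCh, h, ih]

theorem pvSplitCh_pre (c0 : Char) (pre l) :
    pvSplitCh c0 pre l = pvConsFirst pre (pvSplitCh c0 [] l) := by
  induction l generalizing pre with
  | nil => simp [pvSplitCh, pvConsFirst]
  | cons c t ih =>
    by_cases h : c = c0
    · simp [pvSplitCh, h, pvConsFirst]
    · rw [pvSplitCh, if_neg h, ih, pvSplitCh, if_neg h]
      simp only [List.nil_append]
      rw [ih [c], pvConsFirst_append]

theorem pvSplitCh_parts_no_sep (c0 : Char) (pre l) (hpre : c0 ∉ pre) :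
    ∀ part ∈ pvSplitCh c0 pre l, c0 ∉ part := by
  induction l generalizing pre with
  | nil => simpa [pvSplitCh] using hpre
  | cons c t ih =>
    by_cases h : c = c0
    · rw [pvSplitCh, if_pos h]
      intro part hp
      rcases List.mem_cons.mp hp with rfl | hp
      · exact hpre
      · exact ih [] (by simp) part hp
    · rw [pvSplitCh, if_neg h]
      exact ih (pre ++ [c]) (by simp [hpre]; intro hc; exact h hc.symm) 

theorem pvRejoin_splitCh : ∀ (l pre : List Char),
    pvRejoin (pvSplitCh '"' pre l) = pre ++ l := by
  intro l
  induction l with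
  | nil => intro pre; simp [pvSplitCh, pvRejoin]
  | cons c t ih =>
    intro pre
    by_cases h : c = '"'
    · rw [pvSplitCh, if_pos h]
      cases hs : pvSplitCh '"' ([] : List Char) t with
      | nil => exact absurd hs (pvSplitCh_ne_nil _ _ _)
      | cons x xs =>
        rw [show pvRejoin (pre :: x :: xs) = pre ++ '"' :: pvRejoin (x :: xs) from rfl, ← hs,
          ih []]
        simp [h]
    · rw [pvSplitCh, if_neg h, ih (pre ++ [c])]
      simp

theorem pvSplitOn_go_single (c0 : Char) : ∀ (fuel : Nat) (l cur : List Char) (acc : List (List Char)),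
    l.length < fuel →
    PySem.Chars.splitOn.go [c0] fuel l cur acc = acc.reverse ++ pvSplitCh c0 cur.reverse l := by
  intro fuel
  induction fuel with
  | zero => intro l cur acc h; omega
  | succ fuel ih =>
    intro l cur acc h
    cases l with
    | nil => simp [PySem.Chars.splitOn.go, pvSplitCh]
    | cons c rest =>
      rw [PySem.Chars.splitOn.go]
      by_cases hc : c = c0
      · have hpre : List.isPrefixOf [c0] (c :: rest) = true := by simp [List.isPrefixOf, hc]
        rw [if_pos hpre]
        simp only [List.length_cons] at h
        rw [ih _ _ _ (by simpa using Nat.lt_of_succ_lt_succ h)]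
        simp [pvSplitCh, hc]
      · have hpre : ¬ List.isPrefixOf [c0] (c :: rest) = true := by
          simp [List.isPrefixOf]; intro hh; exact absurd hh.symm hc
        rw [if_neg hpre]
        simp only [List.length_cons] at h
        rw [ih _ _ _ (Nat.lt_of_succ_lt_succ h)]
        simp [pvSplitCh, hc]

theorem pvSplitOn_single (c0 : Char) (cs : List Char) :
    PySem.Chars.splitOn cs [c0] = pvSplitCh c0 [] cs := by
  rw [PySem.Chars.splitOn, pvSplitOn_go_single c0 _ _ _ _ (by omega)]
  simp

theorem pvAppendLast_eq (ps : List (List Char)) (p : List Char) (c : Char) :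
    pvAppendLast (ps ++ [p]) c = ps ++ [p ++ [c]] := by
  induction ps with
  | nil => simp [pvAppendLast]
  | cons q qs ih =>
    cases qs with
    | nil => simp [pvAppendLast]
    | cons r rs =>
      rw [show pvAppendLast ((q :: r :: rs) ++ [p]) c = q :: pvAppendLast ((r :: rs) ++ [p]) c
        from rfl, ih]
      simp

theorem pvGo_ne_nil (cs : List Char) (inq : Bool) : pvGo cs inq ≠ [] := by
  cases cs with
  | nil => simp [pvGo]
  | cons c t =>
    rw [pvGo]
    split_ifs
    · exact pvGo_ne_nil t (!inq)
    · simp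
    · exact pvConsFirst_ne_nil _ _

theorem pvConsFirst_nil (xs : List (List Char)) (h : xs ≠ []) : pvConsFirst [] xs = xs := by
  cases xs with
  | nil => exact absurd rfl h
  | cons q qs => simp [pvConsFirst]

theorem pvLoopA_spec (cs : List Char) : ∀ (inq : Bool) (ps : List (List Char)) (p : List Char),
    (cs.foldl pvLoopA (inq, ps ++ [p])).2 = ps ++ pvConsFirst p (pvGo cs inq) := by
  induction cs with
  | nil => intro inq ps p; simp [pvGo, pvConsFirst]
  | cons c t ih =>
    intro inq ps p
    by_cases hc : c = '"'
    · rw [List.foldl_cons]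
      rw [show pvLoopA (inq, ps ++ [p]) c = (!inq, ps ++ [p]) by simp [pvLoopA, hc]]
      rw [ih, pvGo, if_pos hc]
    · by_cases hd : c = '.' ∧ inq = false
      · rw [List.foldl_cons]
        rw [show pvLoopA (inq, ps ++ [p]) c = (inq, (ps ++ [p]) ++ [[]]) by
          simp [pvLoopA, hc, hd.1, hd.2]]
        rw [ih inq (ps ++ [p]) [], pvGo, if_neg (by simp [hc]), if_pos hd]
        rw [pvConsFirst_nil _ (pvGo_ne_nil t inq)]
        cases hgo : pvGo t inq with
        | nil => exact absurd hgo (pvGo_ne_nil t inq)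
        | cons q qs => simp [pvConsFirst, hd.2]
      · rw [List.foldl_cons]
        rw [show pvLoopA (inq, ps ++ [p]) c = (inq, pvAppendLast (ps ++ [p]) c) by
          rcases Bool.eq_false_or_eq_true inq with h | h <;>
            simp [pvLoopA, hc, h] <;> intro h2 <;> exact absurd ⟨h2, h⟩ hd]
        rw [pvAppendLast_eq, ih inq ps (p ++ [c]), pvGo, if_neg (by simp [hc]), if_neg hd]
        rw [pvConsFirst_append, ← pvConsFirst_append p [c]]

theorem pvGo_no_quote (cs : List Char) (inq : Bool) :
    ∀ part ∈ pvGo cs inq, '"' ∉ part := by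
  induction cs generalizing inq with
  | nil => simp [pvGo]
  | cons c t ih =>
    rw [pvGo]
    split_ifs with h1 h2
    · exact ih (!inq)
    · intro part hp
      rcases List.mem_cons.mp hp with rfl | hp
      · simp
      · exact ih inq part hp
    · intro part hp
      cases hgo : pvGo t inq with
      | nil => exact absurd hgo (pvGo_ne_nil t inq)
      | cons q qs =>
        rw [hgo] at hp
        rcases List.mem_cons.mp hp with rfl | hp
        · have := ih inq q (by simp [hgo])
          simp [this]; intro hq; exact h1 hq.symm
        · exact ih inq part (by simp [hgo, hp])

theorem pvStripQuotes_id (part : List Char) (h : '"' ∉ part) : pvStripQuotes part = part := by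
  cases part with
  | nil => simp [pvStripQuotes]
  | cons c t =>
    rw [pvStripQuotes, if_neg]
    simp only [Bool.and_eq_true, decide_eq_true_eq, beq_iff_eq, not_and]
    intro hx _
    exfalso
    have : c = '"' := by simpa [PySem.List.pyGet?, PySem.List.pyIdx?] using hx.2
    exact h (this ▸ List.mem_cons_self)

-- '"' ∉ cs → the first pass is a plain split on '.'
theorem pvGo_no_quote_eq_split (cs : List Char) (h : '"' ∉ cs) :
    pvGo cs false = pvSplitCh '.' [] cs := by
  induction cs with
  | nil => simp [pvGo, pvSplitCh]
  | cons c t ih =>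
    simp only [List.mem_cons, not_or] at h
    rw [pvGo, if_neg (fun hc => h.1 hc.symm)]
    by_cases hd : c = '.'
    · rw [if_pos ⟨hd, rfl⟩, pvSplitCh, if_pos hd, ih h.2]
    · rw [if_neg (by simp [hd]), pvSplitCh, if_neg hd, ih h.2]
      simp only [List.nil_append]
      rw [pvSplitCh_pre '.' [c]]

theorem pvA_eq (q : String) :
    split_qualified_name q = (pvGo q.toList false).map String.ofList := by
  unfold split_qualified_name
  by_cases h : PySem.Chars.isIn ['"'] q.toList = false
  · rw [if_pos h, pvSplitOn_single, ← pvGo_no_quote_eq_split]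
    have hni := (PySem.Chars.isIn_eq_false_iff _ _).mp h
    intro hm
    rcases List.mem_iff_append.mp hm with ⟨u, v, huv⟩
    exact hni ⟨u, v, by simp [huv]⟩
  · rw [if_neg h]
    have hf := pvLoopA_spec q.toList false [] []
    simp only [List.nil_append] at hf
    rw [pvConsFirst_nil _ (pvGo_ne_nil _ _)] at hf
    show ((q.toList.foldl pvLoopA (false, [[]])).2).map
      (fun part => String.ofList (pvStripQuotes part)) = _
    rw [hf]
    refine List.map_congr_left (fun part hp => ?_)
    rw [pvStripQuotes_id part (pvGo_no_quote _ _ part hp)]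

theorem pvGlue_consFirst (p : List Char) (xs t : List (List Char)) :
    pvGlue (pvConsFirst p xs) t = pvConsFirst p (pvGlue xs t) := by
  cases xs with
  | nil => simp [pvConsFirst, pvGlue]
  | cons q qs =>
    cases qs with
    | nil => cases t <;> simp [pvConsFirst, pvGlue, List.append_assoc]
    | cons r rs => simp [pvConsFirst, pvGlue]

theorem pvGlue_ne_nil (xs t : List (List Char)) (h : t ≠ []) : pvGlue xs t ≠ [] := by
  induction xs with
  | nil => simpa [pvGlue]
  | cons q qs ih =>
    cases qs with
    | nil => simp [pvGlue]; exact pvConsFirst_ne_nil _ _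
    | cons r rs => simp [pvGlue]

theorem pvProcSegs_ne_nil (segs : List (List Char)) (inq : Bool) :
    pvProcSegs segs inq ≠ [] := by
  cases segs with
  | nil => simp [pvProcSegs]
  | cons s rest =>
    rw [pvProcSegs]
    split_ifs
    · exact pvConsFirst_ne_nil _ _
    · exact pvGlue_ne_nil _ _ (pvProcSegs_ne_nil rest (!inq))

-- quote-free segment entered in-quote: the whole segment joins the current part
theorem pvGo_append_true (s r : List Char) (h : '"' ∉ s) :
    pvGo (s ++ r) true = pvConsFirst s (pvGo r true) := by
  induction s with
  | nil => simp [pvConsFirst_nil _ (pvGo_ne_nil r true)]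
  | cons c t ih =>
    simp only [List.mem_cons, not_or] at h
    rw [List.cons_append, pvGo, if_neg (fun hc => h.1 hc.symm), if_neg (by simp),
      ih h.2, ← pvConsFirst_append]
    rfl

-- quote-free segment entered out-of-quote: it is dot-split and glued on
theorem pvGo_append_false (s r : List Char) (h : '"' ∉ s) :
    pvGo (s ++ r) false = pvGlue (pvSplitCh '.' [] s) (pvGo r false) := by
  induction s with
  | nil => simp [pvSplitCh, pvGlue, pvConsFirst_nil _ (pvGo_ne_nil r false)]
  | cons c t ih =>
    simp only [List.mem_cons, not_or] at h
    rw [List.cons_append, pvGo, if_neg (fun hc => h.1 hc.symm)]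
    by_cases hd : c = '.'
    · rw [if_pos ⟨hd, rfl⟩, pvSplitCh, if_pos hd, ih h.2]
      cases hs : pvSplitCh '.' ([] : List Char) t with
      | nil => exact absurd hs (pvSplitCh_ne_nil _ _ _)
      | cons q qs => simp [pvGlue]
    · rw [if_neg (by simp [hd]), pvSplitCh, if_neg hd, ih h.2]
      simp only [List.nil_append]
      rw [pvSplitCh_pre '.' [c], pvGlue_consFirst]

theorem pvGo_rejoin (segs : List (List Char)) (h : ∀ s ∈ segs, '"' ∉ s) (inq : Bool) :
    pvGo (pvRejoin segs) inq = pvProcSegs segs inq := by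
  induction segs generalizing inq with
  | nil => cases inq <;> simp [pvRejoin, pvGo, pvProcSegs]
  | cons s rest ih =>
    have hs : '"' ∉ s := h s (by simp)
    have hrest : ∀ x ∈ rest, '"' ∉ x := fun x hx => h x (by simp [hx])
    cases rest with
    | nil =>
      rw [show pvRejoin [s] = s from rfl, show s = s ++ ([] : List Char) by simp]
      cases inq with
      | true => rw [pvGo_append_true _ _ hs]; simp [pvGo, pvProcSegs]
      | false => rw [pvGo_append_false _ _ hs]; simp [pvGo, pvProcSegs]
    | cons r rs =>
      rw [show pvRejoin (s :: r :: rs) = s ++ '"' :: pvRejoin (r :: rs) from rfl]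
      cases inq with
      | true =>
        rw [pvGo_append_true _ _ hs, show pvGo ('"' :: pvRejoin (r :: rs)) true
          = pvGo (pvRejoin (r :: rs)) false by rw [pvGo]; simp]
        rw [ih hrest false]
        conv_rhs => rw [pvProcSegs]
        simp
      | false =>
        rw [pvGo_append_false _ _ hs, show pvGo ('"' :: pvRejoin (r :: rs)) false
          = pvGo (pvRejoin (r :: rs)) true by rw [pvGo]; simp]
        rw [ih hrest true]
        conv_rhs => rw [pvProcSegs]
        simp

theorem pvInnerFold (ps : List (List Char)) : ∀ (res : List (List Char)) (c : List Char),
    ps.foldl (fun st2 piece => (st2.1 ++ [st2.2], piece)) (res, c)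
      = (res ++ (pvInner c ps).1, (pvInner c ps).2) := by
  induction ps with
  | nil => intro res c; simp [pvInner]
  | cons p ps ih => intro res c; rw [List.foldl_cons, ih, pvInner]; simp

theorem pvGlue_inner (q : List Char) (qs t : List (List Char)) :
    pvGlue (q :: qs) t = (pvInner q qs).1 ++ pvConsFirst (pvInner q qs).2 t := by
  induction qs generalizing q with
  | nil => simp [pvGlue, pvInner]
  | cons r rs ih =>
    rw [show pvGlue (q :: r :: rs) t = q :: pvGlue (r :: rs) t from rfl, ih, pvInner]
    simp

theorem pvB_spec (segs : List (List Char)) : ∀ (i : Int), 0 ≤ i →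
    ∀ (res : List (List Char)) (cur : List Char),
    (((PySem.List.enumerate segs i).foldl pvStepB (res, cur)).1
      ++ [((PySem.List.enumerate segs i).foldl pvStepB (res, cur)).2])
      = res ++ pvConsFirst cur (pvProcSegs segs (PySem.Int.mod i 2 == 1)) := by
  induction segs with
  | nil =>
    intro i hi res cur
    simp [PySem.List.enumerate, pvProcSegs, pvConsFirst]
  | cons s rest ih =>
    intro i hi res cur
    have hmod : PySem.Int.mod i 2 = i % 2 := PySem.Int.mod_eq_emod_of_pos (by norm_num)
    have hmod1 : PySem.Int.mod (i + 1) 2 = (i + 1) % 2 :=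
      PySem.Int.mod_eq_emod_of_pos (by norm_num)
    rw [show PySem.List.enumerate (s :: rest) i = (i, s) :: PySem.List.enumerate rest (i + 1)
      from rfl, List.foldl_cons]
    by_cases he : PySem.Int.mod i 2 = 0
    · have hp0 : (PySem.Int.mod i 2 == 1) = false := by rw [he]; rfl
      have hp1 : (PySem.Int.mod (i + 1) 2 == 1) = true := by
        rw [hmod1]
        have : i % 2 = 0 := by rw [← hmod]; exact he
        simp
        omega
      rw [show pvStepB (res, cur) (i, s)
          = (match PySem.Chars.splitOn s ['.'] with
            | [] => (res, cur)
            | p :: ps => ps.foldl (fun st2 piece => (st2.1 ++ [st2.2], piece)) (res, cur ++ p))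
        by simp only [pvStepB]; rw [if_pos he]]
      cases hsp : PySem.Chars.splitOn s ['.'] with
      | nil => exact absurd (by rw [pvSplitOn_single] at hsp; exact hsp) (pvSplitCh_ne_nil _ _ _)
      | cons p ps =>
        rw [show (match p :: ps with
            | [] => (res, cur)
            | p :: ps => List.foldl (fun st2 piece => (st2.1 ++ [st2.2], piece)) (res, cur ++ p) ps)
          = List.foldl (fun st2 piece => (st2.1 ++ [st2.2], piece)) (res, cur ++ p) ps from rfl]
        rw [pvInnerFold, ih (i + 1) (by omega)]
        conv_rhs => rw [pvProcSegs]
        rw [hp0, hp1, if_neg (by simp)]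
        rw [← pvSplitOn_single, hsp, ← pvGlue_consFirst,
          show pvConsFirst cur (p :: ps) = (cur ++ p) :: ps from rfl, pvGlue_inner]
        simp
    · have h1 : PySem.Int.mod i 2 = 1 := by omega
      rw [show pvStepB (res, cur) (i, s) = (res, cur ++ s) by
        simp only [pvStepB]; rw [if_neg he]]
      rw [ih (i + 1) (by omega) res (cur ++ s)]
      have hp1 : (PySem.Int.mod (i + 1) 2 == 1) = false := by
        rw [hmod1]; simp; omega
      have hp0 : (PySem.Int.mod i 2 == 1) = true := by rw [h1]; rfl
      rw [hp1, hp0]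
      conv_rhs => rw [pvProcSegs]
      simp [pvConsFirst_append]

theorem pvB_eq (q : String) :
    split_qualified_name_alt q
      = (pvProcSegs (pvSplitCh '"' [] q.toList) false).map String.ofList := by
  have hb := pvB_spec (PySem.Chars.splitOn q.toList ['"']) 0 (le_refl 0) [] []
  have h0 : (PySem.Int.mod (0 : Int) 2 == 1) = false := by decide
  rw [h0] at hb
  simp only [List.nil_append] at hb
  rw [pvSplitOn_single] at hb
  rw [pvConsFirst_nil _ (pvProcSegs_ne_nil _ _)] at hb
  show List.map String.ofList
      (((PySem.List.enumerate (PySem.Chars.splitOn q.toList ['"']) 0).foldl pvStepB ([], [])).1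
        ++ [((PySem.List.enumerate (PySem.Chars.splitOn q.toList ['"']) 0).foldl
              pvStepB ([], [])).2])
    = _
  rw [pvSplitOn_single, hb]

-- ===== VERDICT (by name: the statement is the Claim_ definition above) =====
theorem split_qualified_name_spec : Claim_equal_split_qualified_name := by
  intro q _
  unfold Spec_split_qualified_name
  rw [pvA_eq, pvB_eq]
  have hsegs := pvSplitCh_parts_no_sep '"' [] q.toList (by simp)
  have hre : pvRejoin (pvSplitCh '"' [] q.toList) = q.toList := by
    simpa using pvRejoin_splitCh q.toList []
  conv_lhs => rw [← hre]
  rw [pvGo_rejoin _ hsegs false]
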